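-- pv_equiv track=rewrite | github.com/iAmSomething/2026- | scripts/run_issue312_commoncode_resync.py | _suffix_set_by_prefix
-- ===== SOURCE A (Python) =====
-- def _suffix_set_by_prefix(codes: set[str]) -> dict[str, set[int]]:
--     out: dict[str, set[int]] = {}
--     for code in codes:
--         if not isinstance(code, str) or "-" not in code:
--             continue
--         prefix, suffix = code.split("-", 1)
--         if not suffix.isdigit():
--             continue
--         out.setdefault(prefix, set()).add(int(suffix))
--     return out
-- ===== SOURCE B (Python) =====
-- def _suffix_set_by_prefix(codes):
--     pairs = [
--         (code.split("-", 1)[0], int(code.split("-", 1)[1]))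
--         for code in codes
--         if isinstance(code, str) and "-" in code and code.split("-", 1)[1].isdigit()
--     ]
--     return {p: {n for q, n in pairs if q == p} for p, _ in pairs}
-- ===== Notes on version B (the rewrite author's own statement) =====
-- stated objective: alternative
-- what changed: Replaces the incremental setdefault/mutate dict-bucketing loop with a two-stage pipeline: a comprehension builds the validated (prefix, int(suffix)) pair list once, then dict/set comprehensions group each distinct prefix by a nested scan of that list.
import Mathlib
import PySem

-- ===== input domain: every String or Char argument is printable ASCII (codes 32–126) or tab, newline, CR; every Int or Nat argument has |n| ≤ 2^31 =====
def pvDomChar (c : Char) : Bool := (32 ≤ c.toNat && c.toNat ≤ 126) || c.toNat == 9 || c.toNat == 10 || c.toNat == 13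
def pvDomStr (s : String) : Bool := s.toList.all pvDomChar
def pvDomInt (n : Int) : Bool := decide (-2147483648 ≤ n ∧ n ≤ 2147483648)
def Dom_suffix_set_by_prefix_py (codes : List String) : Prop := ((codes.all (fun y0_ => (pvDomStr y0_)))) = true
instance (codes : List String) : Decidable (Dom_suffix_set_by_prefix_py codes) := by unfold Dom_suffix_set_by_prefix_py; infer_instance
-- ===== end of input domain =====

-- B replaces A's incremental setdefault-bucketing with a comprehension pipeline: build the
-- validated (prefix, int suffix) pair list once, then group each prefix by a nested scan (objective: alternative).

-- ===== PORT A =====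
-- out.setdefault(prefix, set()).add(int(suffix))  =  overwrite-in-place insert of (getD prefix []).add n
-- 'prefix, suffix = code.split("-", 1)': under the '"-" in code' guard the split has exactly
-- two parts, so reading them with getD is exact there
def suffix_set_by_prefix_py (codes : List String) : List (String × List Int) :=
  (codes.foldl (fun (out : PySem.Dict String (List Int)) code =>
    if PySem.Str.isIn "-" code then
      let parts := (PySem.Str.splitMax? code "-" 1).getD []
      let pre := parts.getD 0 ""
      let suf := parts.getD 1 ""
      if PySem.Str.strIsdigit suf then
        out.insert pre (PySem.Set.add (out.getD pre []) ((PySem.Int.ofStr? suf).getD 0))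
      else out
    else out) PySem.Dict.empty).items

-- ===== PORT B =====
-- the list comprehension of Source B: validated (prefix, int(suffix)) pairs
-- code.split("-", 1)[0] / [1]: same two parts, read by index as Source B does
def pvPairs (codes : List String) : List (String × Int) :=
  codes.filterMap (fun code =>
    if PySem.Str.isIn "-" code then
      let parts := (PySem.Str.splitMax? code "-" 1).getD []
      if PySem.Str.strIsdigit (parts.getD 1 "") then
        some (parts.getD 0 "", (PySem.Int.ofStr? (parts.getD 1 "")).getD 0)
      else none
    else none)

-- {p: {n for q, n in pairs if q == p} for p, _ in pairs}
def suffix_set_by_prefix_py_alt (codes : List String) : List (String × List Int) :=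
  ((pvPairs codes).foldl (fun (d : PySem.Dict String (List Int)) p =>
      d.insert p.1 (PySem.Set.ofList (((pvPairs codes).filter (fun q => q.1 == p.1)).map (·.2))))
    PySem.Dict.empty).items

-- ===== PRECONDITION & SPEC =====
def Spec_suffix_set_by_prefix_py (codes : List String) (out : List (String × List Int)) : Prop := out = suffix_set_by_prefix_py_alt codes
instance (codes : List String) (out : List (String × List Int)) : Decidable (Spec_suffix_set_by_prefix_py codes out) := by unfold Spec_suffix_set_by_prefix_py; infer_instance

-- ===== CLAIM (what is proved, stated in full; the proofs are below) =====
def Claim_equal_suffix_set_by_prefix_py : Prop := ∀ (codes : List String), Dom_suffix_set_by_prefix_py codes → Spec_suffix_set_by_prefix_py codes (suffix_set_by_prefix_py codes)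

-- ===== LEMMAS AND PROOFS =====

-- value of prefix p in the final grouping, as a function of a pair list
def pvVal (ps : List (String × Int)) (p : String) : List Int :=
  PySem.Set.ofList ((ps.filter (fun q => q.1 == p)).map (·.2))

-- dict whose items are ks, each mapped by a value function
def pvMk (ks : List String) (f : String → List Int) : PySem.Dict String (List Int) :=
  PySem.Dict.mk (ks.map (fun k => (k, f k)))

-- A's loop body, re-expressed over the pair list
def pvStep (d : PySem.Dict String (List Int)) (p : String × Int) : PySem.Dict String (List Int) :=
  d.insert p.1 (PySem.Set.add (d.getD p.1 []) p.2)

def pvKeys (ps : List (String × Int)) : List String := PySem.Set.ofList (ps.map (·.1))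

lemma pvA_fold (codes : List String) (d : PySem.Dict String (List Int)) :
    codes.foldl (fun out code =>
      if PySem.Str.isIn "-" code then
        let parts := (PySem.Str.splitMax? code "-" 1).getD []
        let pre := parts.getD 0 ""
        let suf := parts.getD 1 ""
        if PySem.Str.strIsdigit suf then
          out.insert pre (PySem.Set.add (out.getD pre []) ((PySem.Int.ofStr? suf).getD 0))
        else out
      else out) d
    = (pvPairs codes).foldl pvStep d := by
  induction codes generalizing d with
  | nil => rfl
  | cons c cs ih =>
    simp only [List.foldl_cons, pvPairs, List.filterMap_cons]
    by_cases h : PySem.Str.isIn "-" c = true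
    · simp only [h, if_pos]
      by_cases hd : PySem.Str.strIsdigit
          (((PySem.Str.splitMax? c "-" 1).getD []).getD 1 "") = true
      · simp only [hd, if_pos, List.foldl_cons]; exact ih _
      · simp only [hd, Bool.false_eq_true, if_neg, not_false_iff]; exact ih d
    · simp only [h, Bool.false_eq_true, if_neg, not_false_iff]; exact ih d

lemma pvMk_get? (ks : List String) (f : String → List Int) (p : String) :
    (pvMk ks f).get? p = if p ∈ ks then some (f p) else none := by
  induction ks with
  | nil => simp [pvMk]; rfl
  | cons k ks ih =>
    simp only [pvMk, List.map_cons, PySem.Dict.get?_mk_cons]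
    by_cases h : k = p
    · subst h; simp
    · simp only [beq_iff_eq, if_neg h]
      rw [show PySem.Dict.mk (ks.map fun k => (k, f k)) = pvMk ks f from rfl, ih]
      simp [List.mem_cons, Ne.symm h]

lemma pvMk_getD (ks : List String) (f : String → List Int) (p : String)
    (hf : p ∉ ks → f p = []) : (pvMk ks f).getD p [] = f p := by
  rw [PySem.Dict.getD_eq_get?_getD, pvMk_get?]
  by_cases h : p ∈ ks <;> simp [h, hf]

lemma pvMk_contains (ks : List String) (f : String → List Int) (p : String) :
    (pvMk ks f).contains p = decide (p ∈ ks) := by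
  rw [PySem.Dict.contains_eq_isSome_get?, pvMk_get?]
  by_cases h : p ∈ ks <;> simp [h]

lemma pvSet_add_mem (ks : List String) (p : String) (h : p ∈ ks) :
    PySem.Set.add ks p = ks := by
  simpa [PySem.Set.add] using h

lemma pvSet_add_not_mem (ks : List String) (p : String) (h : p ∉ ks) :
    PySem.Set.add ks p = ks ++ [p] := by
  simpa [PySem.Set.add] using h

lemma pvMk_insert (ks : List String) (f g : String → List Int) (p : String)
    (hne : ∀ k, k ≠ p → g k = f k) :
    (pvMk ks f).insert p (g p) = pvMk (PySem.Set.add ks p) g := by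
  apply PySem.Dict.ext
  rw [PySem.Dict.items_insert, pvMk_contains]
  by_cases h : p ∈ ks
  · rw [pvSet_add_mem ks p h]
    simp only [h, decide_true, if_pos]
    show (List.map _ (ks.map fun k => (k, f k))) = ks.map fun k => (k, g k)
    rw [List.map_map]
    apply List.map_congr_left
    intro k _
    by_cases hk : k = p
    · subst hk; simp
    · simp [hk, hne k hk]
  · rw [pvSet_add_not_mem ks p h]
    simp only [h, decide_false, Bool.false_eq_true, if_neg, not_false_iff]
    show (ks.map fun k => (k, f k)) ++ [(p, g p)] = (ks ++ [p]).map fun k => (k, g k)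
    rw [List.map_append]
    have h1 : (ks.map fun k => (k, f k)) = ks.map fun k => (k, g k) :=
      List.map_congr_left (fun k hk => by
        have hkp : k ≠ p := fun hh => h (hh ▸ hk)
        simp [hne k hkp])
    rw [h1]
    rfl

lemma pvVal_not_mem (ps : List (String × Int)) (p : String) (h : p ∉ pvKeys ps) :
    pvVal ps p = [] := by
  have hmem : p ∉ ps.map (fun q => q.1) := by
    intro hc
    exact h (by simpa [pvKeys, PySem.Set.mem_ofList] using hc)
  have hfil : ps.filter (fun q => q.1 == p) = [] := by
    rw [List.filter_eq_nil_iff]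
    intro q hq
    simp only [beq_iff_eq]
    intro he; exact hmem (he ▸ List.mem_map_of_mem hq)
  simp [pvVal, hfil]

lemma pvVal_append (ps : List (String × Int)) (p : String) (n : Int) (k : String) :
    pvVal (ps ++ [(p, n)]) k =
      if k = p then PySem.Set.add (pvVal ps p) n else pvVal ps k := by
  by_cases h : k = p
  · subst h
    simp only [pvVal, List.filter_append, List.map_append]
    simp only [List.filter_cons, beq_self_eq_true, if_pos, List.filter_nil, List.map_cons,
      List.map_nil]
    rw [PySem.Set.ofList, PySem.Set.ofList, List.foldl_append]
    rfl
  · simp only [pvVal, List.filter_append, if_neg h]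
    have hfil : List.filter (fun q => q.1 == k) [(p, n)] = [] := by
      simp [Ne.symm h]
    rw [hfil]; simp

lemma pvKeys_append (ps : List (String × Int)) (p : String) (n : Int) :
    pvKeys (ps ++ [(p, n)]) = PySem.Set.add (pvKeys ps) p := by
  simp only [pvKeys, List.map_append, PySem.Set.ofList, List.foldl_append]
  rfl

lemma pvStep_fold (ps : List (String × Int)) :
    ps.foldl pvStep PySem.Dict.empty = pvMk (pvKeys ps) (pvVal ps) := by
  induction ps using List.reverseRecOn with
  | nil => rfl
  | append_singleton ps x ih =>
    obtain ⟨p, n⟩ := x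
    rw [List.foldl_append, List.foldl_cons, List.foldl_nil, ih]
    show (pvMk (pvKeys ps) (pvVal ps)).insert p
        (PySem.Set.add ((pvMk (pvKeys ps) (pvVal ps)).getD p []) n)
      = pvMk (pvKeys (ps ++ [(p, n)])) (pvVal (ps ++ [(p, n)]))
    rw [pvMk_getD _ _ _ (pvVal_not_mem ps p), pvKeys_append]
    have hval : PySem.Set.add (pvVal ps p) n = pvVal (ps ++ [(p, n)]) p := by
      rw [pvVal_append]; simp
    rw [hval]
    exact pvMk_insert (pvKeys ps) (pvVal ps) (pvVal (ps ++ [(p, n)])) p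
      (fun k hk => by rw [pvVal_append]; simp [hk])

lemma pvGrp_fold (ps acc : List (String × Int)) (ks : List String) :
    ps.foldl (fun d p => d.insert p.1 (pvVal acc p.1)) (pvMk ks (pvVal acc))
      = pvMk (PySem.Set.update ks (ps.map (·.1))) (pvVal acc) := by
  induction ps generalizing ks with
  | nil => simp [PySem.Set.update, pvMk]
  | cons x ps ih =>
    rw [List.foldl_cons, pvMk_insert ks (pvVal acc) (pvVal acc) x.1 (fun _ _ => rfl), ih]
    simp [PySem.Set.update]

-- ===== VERDICT (by name: the statement is the Claim_ definition above) =====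
theorem suffix_set_by_prefix_py_spec : Claim_equal_suffix_set_by_prefix_py := by
  intro codes _
  show suffix_set_by_prefix_py codes = suffix_set_by_prefix_py_alt codes
  unfold suffix_set_by_prefix_py suffix_set_by_prefix_py_alt
  rw [pvA_fold, pvStep_fold]
  have hB : (pvPairs codes).foldl
      (fun (d : PySem.Dict String (List Int)) p =>
        d.insert p.1 (PySem.Set.ofList (((pvPairs codes).filter (fun q => q.1 == p.1)).map (·.2))))
      PySem.Dict.empty
      = pvMk (PySem.Set.update [] ((pvPairs codes).map (·.1))) (pvVal (pvPairs codes)) := by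
    have h := pvGrp_fold (pvPairs codes) (pvPairs codes) []
    simpa [pvVal, pvMk] using h
  rw [hB]
  congr 1
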